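-- pv_equiv track=rewrite | github.com/MlvPrasadOfficial/agenticaiproject | backend/app/agents/narrative_agent.py | _write_implications_section
-- ===== SOURCE A (Python) =====
-- from typing import Dict, Any, List, Optional
--
-- def _write_implications_section(
--
--     implications: List[Dict[str, Any]],
--     insights: Dict[str, Any]
-- ) -> str:
--     """Write the implications section"""
--
--     section = "These findings carry significant business implications:\n\n"
--
--     # Group by type
--     strategic_implications = [i for i in implications if i.get("type") == "strategic"]
--     operational_implications = [i for i in implications if i.get("type") == "operational"]
--
--     if strategic_implications:
--         section += "Strategic Considerations:\n"
--         for impl in strategic_implications[:3]: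
--             section += f"• {impl.get('implication', '')}\n"
--         section += "\n"
--
--     if operational_implications:
--         section += "Operational Impact:\n"
--         for impl in operational_implications[:3]:
--             section += f"• {impl.get('implication', '')}\n"
--         section += "\n"
--
--     return section.strip()
-- ===== SOURCE B (Python) =====
-- def _block(header, bullets):
--     # A block is its header, the preformatted bullet lines, and a blank line; empty if no bullets.
--     return header + "".join(bullets) + "\n" if bullets else ""
--
--
-- def _write_implications_section(implications, insights):
--     # One saturating pass formats up to three bullet lines per type on the fly
--     # (no grouped item lists, no [:3] slicing); the result is composed from
--     # independent block strings instead of growing one section string.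
--     strat, oper = [], []
--     for item in implications:
--         kind = item.get("type")
--         if kind == "strategic" and len(strat) < 3:
--             strat.append(f"• {item.get('implication', '')}\n")
--         elif kind == "operational" and len(oper) < 3:
--             oper.append(f"• {item.get('implication', '')}\n")
--     intro = "These findings carry significant business implications:\n\n"
--     return (intro
--             + _block("Strategic Considerations:\n", strat)
--             + _block("Operational Impact:\n", oper)).strip()
-- ===== Notes on version B (the rewrite author's own statement) =====
-- stated objective: alternative
-- what changed: B replaces A's two filter passes plus per-group [:3] emission loops with one saturating scan that formats at most three bullet lines per type on the fly, and assembles the result by concatenating independently built block strings (join) instead of growing one section string.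
import Mathlib
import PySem

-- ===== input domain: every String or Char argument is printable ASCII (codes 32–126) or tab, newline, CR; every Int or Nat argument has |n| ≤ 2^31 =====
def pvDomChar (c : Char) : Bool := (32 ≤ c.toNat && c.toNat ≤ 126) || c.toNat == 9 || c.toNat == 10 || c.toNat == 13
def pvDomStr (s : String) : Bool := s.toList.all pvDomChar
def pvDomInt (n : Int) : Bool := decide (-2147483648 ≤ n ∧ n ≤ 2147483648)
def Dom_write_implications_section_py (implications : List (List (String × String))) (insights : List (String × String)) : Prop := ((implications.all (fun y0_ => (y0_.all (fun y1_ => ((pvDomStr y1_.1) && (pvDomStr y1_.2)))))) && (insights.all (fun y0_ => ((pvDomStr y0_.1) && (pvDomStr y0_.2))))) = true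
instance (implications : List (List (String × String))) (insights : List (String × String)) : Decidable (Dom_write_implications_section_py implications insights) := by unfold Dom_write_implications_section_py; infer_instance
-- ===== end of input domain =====

-- B replaces A's two filter passes + per-group [:3] emission loops with one saturating scan
-- that formats bullet lines on the fly and a final composition of block strings; same output.

-- ===== PORT A =====
-- dict.get(k[, d]) = first-match association-list lookup (with default); [:3] = take 3 (exact)
def write_implications_section_py (implications : List (List (String × String))) (insights : List (String × String)) : String :=
  let section0 := "These findings carry significant business implications:\n\n"
  -- the two filter comprehensions
  let strategic := implications.filter (fun i => i.lookup "type" == some "strategic")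
  let operational := implications.filter (fun i => i.lookup "type" == some "operational")
  -- 'if strategic_implications:' block with its f-string accumulation loop
  let s1 := if strategic = [] then section0 else
    ((strategic.take 3).foldl
      (fun acc impl => acc ++ ("• " ++ ((impl.lookup "implication").getD "") ++ "\n"))
      (section0 ++ "Strategic Considerations:\n")) ++ "\n"
  let s2 := if operational = [] then s1 else
    ((operational.take 3).foldl
      (fun acc impl => acc ++ ("• " ++ ((impl.lookup "implication").getD "") ++ "\n"))
      (s1 ++ "Operational Impact:\n")) ++ "\n"
  PySem.Str.strip s2

-- ===== PORT B =====
-- f"• {item.get('implication', '')}\n"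
def wisBullet (i : List (String × String)) : String :=
  "• " ++ ((i.lookup "implication").getD "") ++ "\n"

-- loop body of B's single saturating pass (if/elif, append only while under three)
def wisScan (acc : List String × List String) (i : List (String × String)) :
    List String × List String :=
  let kind := i.lookup "type"
  if kind == some "strategic" && decide (acc.1.length < 3) then (acc.1 ++ [wisBullet i], acc.2)
  else if kind == some "operational" && decide (acc.2.length < 3) then (acc.1, acc.2 ++ [wisBullet i])
  else acc

-- _block: header + "".join(bullets) + "\n" if bullets else ""
def wisBlock (header : String) (bullets : List String) : String :=
  if bullets = [] then "" else header ++ String.join bullets ++ "\n"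

def write_implications_section_py_alt (implications : List (List (String × String))) (insights : List (String × String)) : String :=
  let g := implications.foldl wisScan ([], [])
  PySem.Str.strip ("These findings carry significant business implications:\n\n"
    ++ wisBlock "Strategic Considerations:\n" g.1
    ++ wisBlock "Operational Impact:\n" g.2)

-- ===== PRECONDITION & SPEC =====
def Spec_write_implications_section_py (implications : List (List (String × String))) (insights : List (String × String)) (out : String) : Prop := out = write_implications_section_py_alt implications insights
instance (implications : List (List (String × String))) (insights : List (String × String)) (out : String) : Decidable (Spec_write_implications_section_py implications insights out) := by unfold Spec_write_implications_section_py; infer_instance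

-- ===== CLAIM (what is proved, stated in full; the proofs are below) =====
def Claim_equal_write_implications_section_py : Prop := ∀ (implications : List (List (String × String))) (insights : List (String × String)), Dom_write_implications_section_py implications insights → Spec_write_implications_section_py implications insights (write_implications_section_py implications insights)

-- ===== LEMMAS AND PROOFS =====

-- B's saturating scan collects exactly the first (3 - length of what is already there)
-- bullets of each type, i.e. A's filter-then-take-3 groups, preformatted.
theorem wisScan_eq (l : List (List (String × String))) :
    ∀ s o : List String,
      l.foldl wisScan (s, o) =
        (s ++ (((l.filter (fun i => i.lookup "type" == some "strategic")).map wisBullet).take (3 - s.length)),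
         o ++ (((l.filter (fun i => i.lookup "type" == some "operational")).map wisBullet).take (3 - o.length))) := by
  induction l with
  | nil => simp
  | cons i rest ih =>
    intro s o
    by_cases hS : (i.lookup "type" == some "strategic") = true
    · have hO : (i.lookup "type" == some "operational") = false := by
        have := eq_of_beq hS; simp [this]
      by_cases hlt : s.length < 3
      · have htake : ∀ bs : List String,
            (wisBullet i :: bs).take (3 - s.length) = wisBullet i :: bs.take (3 - (s.length + 1)) := by
          intro bs
          have : 3 - s.length = (3 - (s.length + 1)) + 1 := by omega
          simp [this]
        simp [List.foldl_cons, wisScan, hS, hO, hlt, ih, htake, List.append_assoc]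
      · have h0 : 3 - s.length = 0 := by omega
        simp [List.foldl_cons, wisScan, hS, hO, hlt, ih, h0]
    · by_cases hO : (i.lookup "type" == some "operational") = true
      · by_cases hlt : o.length < 3
        · have htake : ∀ bs : List String,
              (wisBullet i :: bs).take (3 - o.length) = wisBullet i :: bs.take (3 - (o.length + 1)) := by
            intro bs
            have : 3 - o.length = (3 - (o.length + 1)) + 1 := by omega
            simp [this]
          simp [List.foldl_cons, wisScan, hS, hO, hlt, ih, htake, List.append_assoc]
        · have h0 : 3 - o.length = 0 := by omega
          simp [List.foldl_cons, wisScan, hS, hO, hlt, ih, h0]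
      · simp [List.foldl_cons, wisScan, hS, hO, ih]

-- String.join distributes over cons
theorem wis_join_shift (bs : List String) : ∀ init : String,
    bs.foldl (fun r s => r ++ s) init = init ++ bs.foldl (fun r s => r ++ s) "" := by
  induction bs with
  | nil => intro init; simp
  | cons b bs ih =>
    intro init
    simp only [List.foldl_cons]
    rw [ih (init ++ b), ih ("" ++ b)]
    simp [String.append_assoc]

theorem wis_join_cons (b : String) (bs : List String) :
    String.join (b :: bs) = b ++ String.join bs := by
  simp only [String.join, List.foldl_cons]
  rw [wis_join_shift bs ("" ++ b)]
  simp

-- A's string-growing loop is the initial string followed by the joined bullet lines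
theorem wis_foldl_join (l : List (List (String × String))) :
    ∀ init : String,
      l.foldl (fun acc impl => acc ++ ("• " ++ ((impl.lookup "implication").getD "") ++ "\n")) init
        = init ++ String.join (l.map wisBullet) := by
  induction l with
  | nil => intro init; simp [String.join]
  | cons i rest ih =>
    intro init
    simp only [List.foldl_cons, List.map_cons, ih, wis_join_cons]
    simp [wisBullet, String.append_assoc]

-- ===== VERDICT (by name: the statement is the Claim_ definition above) =====
theorem write_implications_section_py_spec : Claim_equal_write_implications_section_py := by
  intro implications insights _
  unfold Spec_write_implications_section_py
  unfold write_implications_section_py write_implications_section_py_alt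
  rw [wisScan_eq implications [] []]
  simp only [List.nil_append, List.length_nil, Nat.sub_zero, ← List.map_take, wis_foldl_join]
  by_cases hS : implications.filter (fun i => i.lookup "type" == some "strategic") = []
  · by_cases hO : implications.filter (fun i => i.lookup "type" == some "operational") = []
    · simp [hS, hO, wisBlock]
    · simp only [hS, hO, wisBlock, List.take_eq_nil_iff, List.map_eq_nil_iff, ite_false]
      rw [if_pos (Or.inr trivial), if_neg (by simp : ¬(3 = 0 ∨ False))]
      simp only [if_true, String.append_assoc, String.append_empty]
  · by_cases hO : implications.filter (fun i => i.lookup "type" == some "operational") = []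
    · simp only [hS, hO, wisBlock, List.take_eq_nil_iff, List.map_eq_nil_iff, ite_false]
      rw [if_neg (by simp : ¬(3 = 0 ∨ False)), if_pos (Or.inr trivial)]
      simp only [if_true, String.append_assoc, String.append_empty]
    · simp only [hS, hO, wisBlock, List.take_eq_nil_iff, List.map_eq_nil_iff, ite_false]
      rw [if_neg (by simp : ¬(3 = 0 ∨ False)), if_neg (by simp : ¬(3 = 0 ∨ False))]
      simp only [String.append_assoc]
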